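-- pv_equiv track=rewrite | github.com/tehnarka/-Pseudo-Random-Sequence-Generators-and-Quality-Testing-2023 | AsymCryptoLab1-Python-2023-Nemkovych_fi-94.py | Librarian
-- ===== SOURCE A (Python) =====
-- def Librarian(n, text):
--     lst = []
--     if n > 8 * len(text):
--         return 'Error! Text doesn`t have enough bits'
--     for i in range(0, int(n/8)):
--         temp = ''.join(format(ord(text[i]), '08b'))
--         lst += list(temp)
--     for i in range(0, len(lst)):
--         lst[i] = int(lst[i])
--     return lst
-- ===== SOURCE B (Python) =====
-- def Librarian(n, text):
--     if n > 8 * len(text):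
--         return 'Error! Text doesn`t have enough bits'
--     k = max(int(n / 8), 0)
--     if k == 0:
--         return []
--     # Pack the whole prefix into ONE big integer and render its binary
--     # expansion once, instead of formatting character by character.
--     num = int.from_bytes(text[:k].encode('ascii'), 'big')
--     return [int(d) for d in bin(num)[2:].zfill(8 * k)]
-- ===== Notes on version B (the rewrite author's own statement) =====
-- stated objective: alternative
-- what changed: B packs the whole selected prefix into one big integer (int.from_bytes) and renders its binary expansion once with bin()+zfill, instead of A's per-character '08b' formatting loop followed by a second char-to-int conversion pass.
import Mathlib
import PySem

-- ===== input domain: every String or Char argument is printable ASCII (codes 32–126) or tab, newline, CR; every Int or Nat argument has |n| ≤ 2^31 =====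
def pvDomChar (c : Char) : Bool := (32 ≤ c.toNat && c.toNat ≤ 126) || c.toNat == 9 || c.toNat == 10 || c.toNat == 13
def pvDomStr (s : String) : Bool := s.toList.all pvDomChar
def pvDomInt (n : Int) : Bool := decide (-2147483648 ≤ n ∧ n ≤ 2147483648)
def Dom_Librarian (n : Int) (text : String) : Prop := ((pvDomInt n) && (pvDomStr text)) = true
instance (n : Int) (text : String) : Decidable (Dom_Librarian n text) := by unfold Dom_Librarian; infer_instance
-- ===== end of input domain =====

-- B packs the whole selected prefix into one big integer and renders its binary expansion
-- once (bin + zfill), instead of A's per-character '08b' formatting loop plus a second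
-- char-to-int pass (objective: alternative — one bulk conversion instead of per-character
-- formatting, similar asymptotic cost).

-- ===== PORT A =====
-- Port of A. 'int(n/8)' is float division then truncation toward zero: exact for |n| ≤ 2^31,
-- so ported as Int.tdiv. "format(ord(c),'08b')" = binary digits zero-padded to width 8
-- (ord ≥ 0), ported as zfill of toBinChars. text[i] is always in range when the loop runs
-- inside Pre_, so the .getD ' ' default is unreachable there. 'int(ch)' acts on '0'/'1'
-- digit chars only; ported via PySem.Int.ofStr? on the one-char string.
def Librarian (n : Int) (text : String) : List Int :=
  if n > 8 * (PySem.Str.len text) then [] -- A returns an error STRING here (not a list); excluded by Pre_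
  else
    let lst := (PySem.List.pyRange 0 (Int.tdiv n 8) 1).foldl
      (fun lst i =>
        lst ++ PySem.Chars.zfill
          (PySem.Int.toBinChars ((((PySem.Str.pyGet? text i).getD ' ').toNat : Int))) 8) []
    lst.map (fun ch => (PySem.Int.ofStr? (String.ofList [ch])).getD 0)

-- ===== PORT B =====
-- Port of Source B. k = max(int(n/8), 0) as above; int.from_bytes(prefix.encode('ascii'), 'big')
-- is the big-endian fold acc*256 + ord(c) over the prefix (encode('ascii') is the identity on
-- code points, exact for the ASCII domain; for ord ≥ 128 Python raises, outside Dom).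
-- bin(num)[2:] for num ≥ 0 is exactly format(num,'b') = PySem.Int.toBinChars; then zfill(8*k)
-- and one int(d) per digit char.
def Librarian_alt (n : Int) (text : String) : List Int :=
  if n > 8 * (PySem.Str.len text) then []
  else
    let k := (max (Int.tdiv n 8) 0).toNat
    if k = 0 then []
    else
      let num : Nat := (text.toList.take k).foldl (fun a c => a * 256 + c.toNat) 0
      (PySem.Chars.zfill (PySem.Int.toBinChars (num : Int)) (8 * (k : Int))).map
        (fun d => (PySem.Int.ofStr? (String.ofList [d])).getD 0)

-- ===== PRECONDITION & SPEC =====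
-- Pre_ excludes exactly the inputs with n > 8*len(text), where A returns the error STRING
-- 'Error! Text doesn`t have enough bits' instead of a list of ints (not a value of the declared type).
def Pre_Librarian (n : Int) (text : String) : Prop := n ≤ 8 * (PySem.Str.len text)
instance (n : Int) (text : String) : Decidable (Pre_Librarian n text) := by unfold Pre_Librarian; infer_instance
def pvWitness_Librarian : Int × String := (9, "ab")

def Spec_Librarian (n : Int) (text : String) (out : List Int) : Prop := out = Librarian_alt n text
instance (n : Int) (text : String) (out : List Int) : Decidable (Spec_Librarian n text out) := by unfold Spec_Librarian; infer_instance

-- ===== CLAIM (what is proved, stated in full; the proofs are below) =====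
def Claim_equal_Librarian : Prop := ∀ (n : Int) (text : String), Dom_Librarian n text → Pre_Librarian n text → Spec_Librarian n text (Librarian n text)

-- ===== LEMMAS AND PROOFS =====

-- The canonical value both ports are reduced to: the 8 MSB-first bits of each prefix char.
def pvBits (l : List Char) : List Int :=
  l.flatMap (fun c => (List.range 8).map (fun j => (((c.toNat >>> (7 - j)) &&& 1 : Nat) : Int)))

-- digit-char → int, as both ports apply it
def pvDig (ch : Char) : Int := (PySem.Int.ofStr? (String.ofList [ch])).getD 0

-- structural binary rendering (= Nat.toDigits 2, proved below)
def pvBin (m : Nat) : List Char :=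
  if _h : m < 2 then [Nat.digitChar m]
  else pvBin (m / 2) ++ [Nat.digitChar (m % 2)]
decreasing_by exact Nat.div_lt_self (by omega) (by omega)

theorem pv_toDigitsCore_succ (b fuel n : Nat) (ds : List Char) :
    Nat.toDigitsCore b (fuel + 1) n ds =
      if n / b = 0 then (n % b).digitChar :: ds
      else Nat.toDigitsCore b fuel (n / b) ((n % b).digitChar :: ds) := by
  rfl

theorem pv_toDigitsCore_append (b : Nat) : ∀ (fuel n : Nat) (ds : List Char),
    Nat.toDigitsCore b fuel n ds = Nat.toDigitsCore b fuel n [] ++ ds := by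
  intro fuel
  induction fuel with
  | zero => intro n ds; rfl
  | succ fuel ih =>
    intro n ds
    rw [pv_toDigitsCore_succ, pv_toDigitsCore_succ]
    by_cases h : n / b = 0
    · simp [h]
    · rw [if_neg h, if_neg h, ih (n / b) [(n % b).digitChar],
        ih (n / b) ((n % b).digitChar :: ds)]
      simp

theorem pv_toDigitsCore_eq_pvBin : ∀ (n fuel : Nat), n < fuel →
    Nat.toDigitsCore 2 fuel n [] = pvBin n := by
  intro n
  induction n using Nat.strong_induction_on with
  | _ n ih =>
    intro fuel hf
    match fuel, hf with
    | fuel + 1, hf =>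
      rw [pv_toDigitsCore_succ]
      by_cases h : n < 2
      · have : n / 2 = 0 := by omega
        rw [if_pos this, pvBin]
        simp [h, Nat.mod_eq_of_lt h]
      · have hne : ¬ n / 2 = 0 := by omega
        rw [if_neg hne, pv_toDigitsCore_append, ih (n / 2) (by omega) fuel (by omega)]
        conv_rhs => rw [pvBin]
        rw [dif_neg h]

theorem pv_toDigits_eq_pvBin (n : Nat) : Nat.toDigits 2 n = pvBin n :=
  pv_toDigitsCore_eq_pvBin n (n + 1) (by omega)

theorem pvBin_mem : ∀ m : Nat, ∀ c ∈ pvBin m, c = '0' ∨ c = '1' := by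
  intro m
  induction m using Nat.strong_induction_on with
  | _ m ih =>
    intro c hc
    rw [pvBin] at hc
    by_cases h : m < 2
    · rw [dif_pos h] at hc
      have hms : c = Nat.digitChar m := List.mem_singleton.mp hc
      subst hms
      interval_cases m <;> [left; right] <;> decide
    · rw [dif_neg h] at hc
      rcases List.mem_append.mp hc with h1 | h1
      · exact ih (m / 2) (Nat.div_lt_self (by omega) (by omega)) c h1
      · have : m % 2 = 0 ∨ m % 2 = 1 := by omega
        have hms : c = Nat.digitChar (m % 2) := List.mem_singleton.mp h1
        subst hms
        rcases this with h2 | h2 <;> rw [h2] <;> [left; right] <;> decide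

theorem pvBin_ne_nil (m : Nat) : pvBin m ≠ [] := by
  rw [pvBin]; split <;> simp

-- zfill on an unsigned digit string is a plain left pad
theorem pv_zfill_eq_pad (cs : List Char) (hcs : cs ≠ [])
    (hd : ∀ c ∈ cs, c = '0' ∨ c = '1') (w : Nat) :
    PySem.Chars.zfill cs (w : Int) = List.replicate (w - cs.length) '0' ++ cs := by
  unfold PySem.Chars.zfill
  by_cases h : (w : Int) ≤ (cs.length : Int)
  · rw [if_pos h]
    have : w - cs.length = 0 := by omega
    simp [this]
  · rw [if_neg h]
    match cs, hcs with
    | c :: rest, _ =>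
      have hc := hd c (List.mem_cons_self)
      have hns : ¬ (c = '+' ∨ c = '-') := by rcases hc with h1 | h1 <;> simp [h1]
      simp only [hns, if_false]
      simp

-- the big-endian bit list of m rendered through pvBin+pad equals direct bit extraction
theorem pv_pad_bits : ∀ (L m : Nat), 1 ≤ L → m < 2 ^ L →
    (List.replicate (L - (pvBin m).length) '0' ++ pvBin m).map pvDig
      = (List.range L).map (fun i => (((m >>> (L - 1 - i)) &&& 1 : Nat) : Int)) := by
  intro L
  induction L with
  | zero => omega
  | succ L ih =>
    intro m _ hm
    by_cases hL : L = 0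
    · subst hL
      have hm2 : m < 2 := by omega
      rw [pvBin, dif_pos hm2]
      interval_cases m <;> decide
    · -- L ≥ 1
      have hL1 : 1 ≤ L := by omega
      have hrange : List.range (L + 1) = List.range L ++ [L] := List.range_succ
      have hrhs : (List.range (L + 1)).map
            (fun i => (((m >>> (L + 1 - 1 - i)) &&& 1 : Nat) : Int))
          = (List.range L).map (fun i => ((((m / 2) >>> (L - 1 - i)) &&& 1 : Nat) : Int))
            ++ [((m &&& 1 : Nat) : Int)] := by
        rw [hrange, List.map_append]
        congr 1
        · apply List.map_congr_left
          intro i hi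
          have hi' : i < L := List.mem_range.mp hi
          have he : L + 1 - 1 - i = (L - 1 - i) + 1 := by omega
          rw [he]
          congr 2
          rw [Nat.shiftRight_eq_div_pow, Nat.shiftRight_eq_div_pow, pow_succ,
            Nat.div_div_eq_div_mul, Nat.mul_comm, ← Nat.div_div_eq_div_mul]
        · simp
      rw [hrhs]
      have hdiv : m / 2 < 2 ^ L := by
        rw [Nat.div_lt_iff_lt_mul (by omega)]
        rw [pow_succ] at hm; omega
      by_cases h2 : m < 2
      · -- pvBin m = [digitChar m], m/2 = 0
        have hm0 : m / 2 = 0 := by omega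
        have hdc : pvDig (Nat.digitChar m) = ((m &&& 1 : Nat) : Int) := by
          interval_cases m <;> decide
        have hz : pvDig '0' = 0 := by decide
        have hrz : (List.range L).map
              (fun i => ((((m / 2) >>> (L - 1 - i)) &&& 1 : Nat) : Int))
            = List.replicate L (0 : Int) := by
          rw [List.eq_replicate_iff]
          refine ⟨by simp, ?_⟩
          intro b hb
          simp only [List.mem_map, List.mem_range] at hb
          obtain ⟨i, _, hbi⟩ := hb
          rw [hm0] at hbi
          simp [Nat.zero_shiftRight] at hbi
          omega
        rw [hrz, pvBin, dif_pos h2]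
        simp only [List.length_cons, List.length_nil, List.map_append,
          List.map_replicate, hz, hdc, List.map_cons, List.map_nil]
        have he : L + 1 - 1 = L := by omega
        rw [he]
      · -- m ≥ 2
        have ihm := ih (m / 2) hL1 hdiv
        rw [pvBin, dif_neg h2]
        have hlen : (pvBin (m / 2) ++ [Nat.digitChar (m % 2)]).length
            = (pvBin (m / 2)).length + 1 := by simp
        have hre : L + 1 - (pvBin (m / 2)).length - 1 = L - (pvBin (m / 2)).length := by
          omega
        rw [hlen]
        have : List.replicate (L + 1 - ((pvBin (m / 2)).length + 1)) '0'
              ++ (pvBin (m / 2) ++ [Nat.digitChar (m % 2)])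
            = (List.replicate (L - (pvBin (m / 2)).length) '0' ++ pvBin (m / 2))
              ++ [Nat.digitChar (m % 2)] := by
          have he : L + 1 - ((pvBin (m / 2)).length + 1) = L - (pvBin (m / 2)).length := by
            omega
          rw [he, List.append_assoc]
        rw [this, List.map_append, ihm]
        congr 1
        have hmod : m % 2 = 0 ∨ m % 2 = 1 := by omega
        have hand : (m &&& 1) = m % 2 := Nat.and_one_is_mod m
        simp only [List.map_cons, List.map_nil]
        rw [hand]
        rcases hmod with h0 | h0 <;> rw [h0] <;> decide

-- the packed number of a byte list, big-endian
def pvNum (l : List Char) : Nat := l.foldl (fun a c => a * 256 + c.toNat) 0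

theorem pv_foldl_shift : ∀ (l : List Char) (a : Nat),
    l.foldl (fun a c => a * 256 + c.toNat) a = a * 256 ^ l.length + pvNum l := by
  intro l
  induction l with
  | nil => intro a; simp [pvNum]
  | cons c t ih =>
    intro a
    simp only [List.foldl_cons]
    rw [ih (a * 256 + c.toNat)]
    have h1 : pvNum (c :: t) = c.toNat * 256 ^ t.length + pvNum t := by
      unfold pvNum
      simp only [List.foldl_cons, Nat.zero_mul, Nat.zero_add]
      rw [ih c.toNat]
      rfl
    rw [h1, List.length_cons, pow_succ]
    ring

theorem pv_num_lt : ∀ l : List Char, (∀ c ∈ l, c.toNat < 256) →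
    pvNum l < 256 ^ l.length := by
  intro l
  induction l with
  | nil => intro _; simp [pvNum]
  | cons c t ih =>
    intro h
    have h1 : pvNum (c :: t) = c.toNat * 256 ^ t.length + pvNum t := by
      unfold pvNum
      simp only [List.foldl_cons, Nat.zero_mul, Nat.zero_add]
      rw [pv_foldl_shift t c.toNat]
      rfl
    have hc : c.toNat < 256 := h c (List.mem_cons_self)
    have ht := ih (fun x hx => h x (List.mem_cons_of_mem c hx))
    have : 256 ^ (c :: t).length = 256 * 256 ^ t.length := by
      simp [pow_succ]; ring
    rw [h1, this]
    nlinarith [pow_pos (by omega : (0:Nat) < 256) t.length]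

-- high bits of a*2^m + r (r < 2^m) come from a, low bits from r
theorem pv_shift_high (a r m j : Nat) (hr : r < 2 ^ m) :
    (a * 2 ^ m + r) >>> (m + j) = a >>> j := by
  rw [Nat.shiftRight_eq_div_pow, Nat.shiftRight_eq_div_pow]
  have h1 : (a * 2 ^ m + r) / 2 ^ m = a := by
    rw [Nat.mul_comm a, Nat.mul_add_div (by positivity)]
    simp [Nat.div_eq_of_lt hr]
  rw [pow_add, ← Nat.div_div_eq_div_mul, h1]

theorem pv_shift_low (a r m j : Nat) (hj : j < m) :
    ((a * 2 ^ m + r) >>> j) &&& 1 = (r >>> j) &&& 1 := by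
  rw [Nat.shiftRight_eq_div_pow, Nat.shiftRight_eq_div_pow,
    Nat.and_one_is_mod, Nat.and_one_is_mod]
  have hm : (2 : Nat) ^ m = 2 ^ j * 2 ^ (m - j) := by rw [← pow_add]; congr 1; omega
  have h1 : a * 2 ^ m + r = 2 ^ j * (a * 2 ^ (m - j)) + r := by rw [hm]; ring
  rw [h1, Nat.mul_add_div (by positivity : 0 < 2 ^ j)]
  obtain ⟨e, he⟩ : ∃ e, m - j = e + 1 := ⟨m - j - 1, by omega⟩
  rw [he, pow_succ, ← Nat.mul_assoc]
  omega

-- direct global bit extraction of the packed number = per-char bit lists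
theorem pv_global_bits : ∀ l : List Char, (∀ c ∈ l, c.toNat < 256) →
    (List.range (8 * l.length)).map
        (fun i => (((pvNum l >>> (8 * l.length - 1 - i)) &&& 1 : Nat) : Int))
      = pvBits l := by
  intro l
  induction l with
  | nil => simp [pvBits, pvNum]
  | cons c t ih =>
    intro h
    have hc : c.toNat < 256 := h c (List.mem_cons_self)
    have ht : ∀ x ∈ t, x.toNat < 256 := fun x hx => h x (List.mem_cons_of_mem c hx)
    have hnum : pvNum (c :: t) = c.toNat * 2 ^ (8 * t.length) + pvNum t := by
      unfold pvNum
      simp only [List.foldl_cons, Nat.zero_mul, Nat.zero_add]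
      rw [pv_foldl_shift t c.toNat]
      have h256 : (256 : Nat) ^ t.length = 2 ^ (8 * t.length) := by
        rw [show (256 : Nat) = 2 ^ 8 by norm_num, ← pow_mul]
      rw [h256]
      rfl
    have hlt : pvNum t < 2 ^ (8 * t.length) := by
      have := pv_num_lt t ht
      rwa [show (256 : Nat) ^ t.length = 2 ^ (8 * t.length) by
        rw [show (256 : Nat) = 2 ^ 8 by norm_num, ← pow_mul]] at this
    have hlen : 8 * (c :: t).length = 8 + 8 * t.length := by simp; ring
    rw [hlen, List.range_add, List.map_append]
    have hfirst : (List.range 8).map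
          (fun i => (((pvNum (c :: t) >>> (8 + 8 * t.length - 1 - i)) &&& 1 : Nat) : Int))
        = (List.range 8).map (fun j => (((c.toNat >>> (7 - j)) &&& 1 : Nat) : Int)) := by
      apply List.map_congr_left
      intro i hi
      have hi8 : i < 8 := List.mem_range.mp hi
      have he : 8 + 8 * t.length - 1 - i = 8 * t.length + (7 - i) := by omega
      rw [hnum, he, pv_shift_high c.toNat (pvNum t) (8 * t.length) (7 - i) hlt]
    have hsecond : ((List.range (8 * t.length)).map (fun x => 8 + x)).map
          (fun i => (((pvNum (c :: t) >>> (8 + 8 * t.length - 1 - i)) &&& 1 : Nat) : Int))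
        = pvBits t := by
      rw [List.map_map, ← ih ht]
      apply List.map_congr_left
      intro i hi
      have hi' : i < 8 * t.length := List.mem_range.mp hi
      have he : 8 + 8 * t.length - 1 - (8 + i) = 8 * t.length - 1 - i := by omega
      simp only [Function.comp]
      rw [hnum, he, pv_shift_low c.toNat (pvNum t) (8 * t.length) (8 * t.length - 1 - i)
        (by omega)]
    rw [hfirst, hsecond]
    simp [pvBits]

-- A side: int-converting the chars of format(c,'08b') gives the 8 MSB-first bits.
theorem pv_bits_of_fmt : ∀ c : Nat, c < 128 →
    (PySem.Chars.zfill (PySem.Int.toBinChars ((c : Int))) 8).map pvDig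
      = (List.range 8).map (fun j => (((c >>> (7 - j)) &&& 1 : Nat) : Int)) := by
  decide

-- The indexed loop over range(k) visits exactly the first k chars of the text.
theorem pv_flat_range (text : String) (F : Char → List Int) :
    ∀ k : Nat, k ≤ text.toList.length →
    (PySem.List.pyRange 0 (k : Int) 1).flatMap
        (fun i => F ((PySem.Str.pyGet? text i).getD ' '))
      = (text.toList.take k).flatMap F := by
  intro k
  induction k with
  | zero => simp [PySem.List.pyRange_one_eq_nil]
  | succ k ih =>
    intro hk
    have h1 : ((k + 1 : Nat) : Int) = (k : Int) + 1 := by push_cast; ring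
    have hlt : k < text.toList.length := by omega
    have htake : List.take (k + 1) text.toList = List.take k text.toList ++ [text.toList[k]] := by
      rw [List.take_add_one]
      simp [List.getElem?_eq_getElem hlt]
    rw [h1, PySem.List.pyRange_one_succ_right (by positivity), List.flatMap_append,
      ih (by omega), htake, List.flatMap_append]
    simp [List.getElem?_eq_getElem hlt]

-- A equals the canonical per-char bits of the prefix (under Dom and Pre_).
theorem pv_A_eq (n : Int) (text : String) (hdom : Dom_Librarian n text)
    (hpre : Pre_Librarian n text) :
    Librarian n text = pvBits (text.toList.take (max (Int.tdiv n 8) 0).toNat) := by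
  unfold Pre_Librarian at hpre
  unfold Librarian
  have hnot : ¬ (n > 8 * (PySem.Str.len text)) := not_lt.mpr hpre
  rw [if_neg hnot]
  rw [PySem.List.foldl_append_eq_flatMap, List.nil_append, List.map_flatMap]
  by_cases hm : Int.tdiv n 8 ≤ 0
  · rw [PySem.List.pyRange_one_eq_nil hm]
    have : (max (Int.tdiv n 8) 0).toNat = 0 := by omega
    simp [this, pvBits]
  · rw [not_le] at hm
    have hlen : (PySem.Str.len text) = (text.toList.length : Int) := by
      simp [PySem.Str.len_eq]
    have hkle : (Int.tdiv n 8).toNat ≤ text.toList.length := by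
      have h8 : Int.tdiv n 8 ≤ (text.toList.length : Int) := by
        rw [hlen] at hpre
        rw [Int.tdiv_eq_ediv] at *
        have hs : Int.sign (8:Int) = 1 := by decide
        rw [hs] at *
        split_ifs at * <;> omega
      omega
    have hmax : (max (Int.tdiv n 8) 0).toNat = (Int.tdiv n 8).toNat := by omega
    have hk : Int.tdiv n 8 = ((Int.tdiv n 8).toNat : Int) := by omega
    rw [hmax]
    conv_lhs => rw [hk]
    have hpd : (fun ch => (PySem.Int.ofStr? (String.ofList [ch])).getD 0) = pvDig := rfl
    rw [hpd]
    rw [pv_flat_range text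
      (fun c => (PySem.Chars.zfill (PySem.Int.toBinChars ((c.toNat : Int))) 8).map pvDig)
      (Int.tdiv n 8).toNat hkle]
    unfold pvBits
    apply List.flatMap_congr
    intro c hc
    have hcmem : c ∈ text.toList := List.mem_of_mem_take hc
    have hdc : pvDomChar c = true := by
      unfold Dom_Librarian at hdom
      simp [pvDomStr, List.all_eq_true] at hdom
      exact hdom.2 c hcmem
    have hclt : c.toNat < 128 := by
      simp [pvDomChar] at hdc
      omega
    exact pv_bits_of_fmt c.toNat hclt

-- B equals the same canonical value (under Dom and Pre_).
theorem pv_B_eq (n : Int) (text : String) (hdom : Dom_Librarian n text)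
    (hpre : Pre_Librarian n text) :
    Librarian_alt n text = pvBits (text.toList.take (max (Int.tdiv n 8) 0).toNat) := by
  unfold Pre_Librarian at hpre
  unfold Librarian_alt
  have hnot : ¬ (n > 8 * (PySem.Str.len text)) := not_lt.mpr hpre
  rw [if_neg hnot]
  set k := (max (Int.tdiv n 8) 0).toNat with hkdef
  by_cases hk0 : k = 0
  · simp [hk0, pvBits]
  · rw [if_neg hk0]
    set pre := text.toList.take k with hpredef
    have hchars : ∀ c ∈ pre, c.toNat < 256 := by
      intro c hc
      have hcmem : c ∈ text.toList := List.mem_of_mem_take hc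
      have hdc : pvDomChar c = true := by
        unfold Dom_Librarian at hdom
        simp [pvDomStr, List.all_eq_true] at hdom
        exact hdom.2 c hcmem
      simp [pvDomChar] at hdc
      omega
    have hprelen : pre.length ≤ k := by
      rw [hpredef]; exact List.length_take_le k text.toList
    -- the port's fold is pvNum pre (definitional), and int(d) is pvDig (definitional)
    show (PySem.Chars.zfill (PySem.Int.toBinChars ((pvNum pre : Nat) : Int))
        (8 * (k : Int))).map pvDig = pvBits pre
    have hlt : pvNum pre < 2 ^ (8 * k) := by
      calc pvNum pre < 256 ^ pre.length := pv_num_lt pre hchars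
        _ ≤ 256 ^ k := Nat.pow_le_pow_right (by omega) hprelen
        _ = 2 ^ (8 * k) := by
            rw [show (256 : Nat) = 2 ^ 8 by norm_num, ← pow_mul]
    -- toBinChars of a nonneg cast is pvBin
    have htb : PySem.Int.toBinChars ((pvNum pre : Nat) : Int) = pvBin (pvNum pre) := by
      unfold PySem.Int.toBinChars
      rw [if_neg (by omega)]
      simp [pv_toDigits_eq_pvBin]
    have h8k : (8 * (k : Int)) = ((8 * k : Nat) : Int) := by push_cast; ring
    rw [htb, h8k, pv_zfill_eq_pad (pvBin (pvNum pre)) (pvBin_ne_nil _) (pvBin_mem _) (8 * k),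
      pv_pad_bits (8 * k) (pvNum pre) (by omega) hlt]
    -- prefix of length k: pre.length = k exactly (Pre_ gives k ≤ len text)
    have hklen : k ≤ text.toList.length := by
      by_cases hm : Int.tdiv n 8 ≤ 0
      · have : k = 0 := by rw [hkdef]; omega
        omega
      · rw [not_le] at hm
        have hlen : (PySem.Str.len text) = (text.toList.length : Int) := by
          simp [PySem.Str.len_eq]
        have h8 : Int.tdiv n 8 ≤ (text.toList.length : Int) := by
          rw [hlen] at hpre
          rw [Int.tdiv_eq_ediv] at *
          have hs : Int.sign (8:Int) = 1 := by decide
          rw [hs] at *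
          split_ifs at * <;> omega
        rw [hkdef]; omega
    have hpl : pre.length = k := by
      rw [hpredef, List.length_take]; omega
    rw [← hpl, pv_global_bits pre hchars]

-- ===== VERDICT (by name: the statement is the Claim_ definition above) =====
theorem Librarian_spec : Claim_equal_Librarian := by
  intro n text hdom hpre
  unfold Spec_Librarian
  rw [pv_A_eq n text hdom hpre, pv_B_eq n text hdom hpre]
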